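-- pv_equiv track=rewrite | github.com/huangweijing/weo_leetcode | 1455_Check_If_a_Word_Occurs_As_a_Prefix_of_Any_Word_in_a_Sentence.py | isPrefixOfWord
-- ===== SOURCE A (Python) =====
-- def isPrefixOfWord(sentence: str, searchWord: str) -> int:
--     ans = 1
--     idx = 0
--     while idx < len(sentence):
--         i = 0
--         while idx < len(sentence) and i < len(searchWord) \
--                 and sentence[idx] == searchWord[i]:
--             idx += 1
--             i += 1
--         if i == len(searchWord):
--             return ans
--         while idx < len(sentence) and sentence[idx] != " ":
--             idx += 1
--         idx += 1
--         ans += 1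
--     return -1
-- ===== SOURCE B (Python) =====
-- def isPrefixOfWord(sentence: str, searchWord: str) -> int:
--     i = 1
--     for word in sentence.split(" "):
--         if word.startswith(searchWord):
--             return i
--         i += 1
--     return -1
-- ===== Notes on version B (the rewrite author's own statement) =====
-- stated objective: idiomatic
-- what changed: A's manual two-pointer character-by-character scan (match, then skip to the next space by hand) is replaced by tokenizing with sentence.split(" ") and one clean pass returning the first 1-based index whose word startswith(searchWord); split/startswith run at C speed instead of a per-character Python loop.
-- outside the precondition, e.g. on isPrefixOfWord('a b', 'a b'): A returns 1, B returns -1; on isPrefixOfWord('', ''): A returns -1, B returns 1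
import Mathlib
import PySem

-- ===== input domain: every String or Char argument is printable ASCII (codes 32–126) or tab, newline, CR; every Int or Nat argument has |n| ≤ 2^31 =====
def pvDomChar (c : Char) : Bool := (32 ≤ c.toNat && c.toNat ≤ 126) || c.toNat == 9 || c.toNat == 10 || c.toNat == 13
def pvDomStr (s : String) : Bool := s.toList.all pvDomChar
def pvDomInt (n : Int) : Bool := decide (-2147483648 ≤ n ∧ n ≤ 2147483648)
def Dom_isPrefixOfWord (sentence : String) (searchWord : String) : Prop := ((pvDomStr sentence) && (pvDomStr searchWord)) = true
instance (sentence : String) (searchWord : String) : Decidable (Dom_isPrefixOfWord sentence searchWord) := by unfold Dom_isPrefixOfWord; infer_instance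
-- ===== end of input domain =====

-- B replaces A's manual two-pointer character scan by the idiomatic split(" ") + startswith pass.

-- ===== PORT A =====
-- inner while #1: advance idx/i while chars match; returns (rest of sentence, rest of searchWord)
def aMatch : List Char → List Char → List Char × List Char
  | c :: s', x :: w' => if c = x then aMatch s' w' else (c :: s', x :: w')
  | s, w => (s, w)

-- inner while #2 ('skip to next space') followed by the unconditional 'idx += 1'
def aSkip (t : List Char) : List Char := (t.dropWhile (· ≠ ' ')).drop 1

theorem aMatch_fst_length (s w : List Char) : (aMatch s w).1.length ≤ s.length := by
  induction s generalizing w with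
  | nil => cases w <;> simp [aMatch]
  | cons c s' ih =>
    cases w with
    | nil => simp [aMatch]
    | cons x w' =>
      by_cases h : c = x <;> simp [aMatch, h]
      exact Nat.le_succ_of_le (ih w')

theorem aSkip_length (t : List Char) : (aSkip t).length ≤ t.length - 1 := by
  unfold aSkip
  have h := List.length_dropWhile_le (fun c => decide (c ≠ ' ')) t
  cases hd : t.dropWhile (· ≠ ' ') with
  | nil => simp
  | cons d ds =>
    have : ds.length + 1 ≤ t.length := by rw [hd] at h; simpa using h
    simp; omega

-- outer while loop of A (state: remaining sentence, ans)
def aLoop (w : List Char) (s : List Char) (ans : Int) : Int :=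
  if h : s = [] then -1
  else
    let p := aMatch s w
    if p.2 = [] then ans
    else aLoop w (aSkip p.1) (ans + 1)
termination_by s.length
decreasing_by
  have h1 := aMatch_fst_length s w
  have h2 := aSkip_length (aMatch s w).1
  have : 0 < s.length := List.length_pos_iff.mpr h
  omega

def isPrefixOfWord (sentence : String) (searchWord : String) : Int :=
  aLoop searchWord.toList sentence.toList 1

-- ===== PORT B =====
-- for-loop over the words with a running 1-based counter
def bLoop (w : List Char) : List (List Char) → Int → Int
  | [], _ => -1
  | word :: rest, i =>
    if PySem.Chars.startswith word w then i else bLoop w rest (i + 1)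

def isPrefixOfWord_alt (sentence : String) (searchWord : String) : Int :=
  bLoop searchWord.toList (PySem.Chars.splitOn sentence.toList " ".toList) 1

-- ===== PRECONDITION & SPEC =====
-- Pre_ excludes (a) searchWords that contain a space AND occur inside the sentence — there A's raw
-- scan may match across a word boundary while B's tokenized reading never matches a multi-word
-- searchWord, and neither behaviour is specified for such input — and (b) the degenerate pair of two
-- empty strings, where '' has no words for A but split(" ") yields one empty word for B; both
-- readings of these corners are defensible.
def Pre_isPrefixOfWord (sentence : String) (searchWord : String) : Prop :=
  (' ' ∈ searchWord.toList → ¬ searchWord.toList <:+: sentence.toList) ∧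
    ¬(sentence = "" ∧ searchWord = "")
instance (sentence : String) (searchWord : String) : Decidable (Pre_isPrefixOfWord sentence searchWord) := by
  unfold Pre_isPrefixOfWord; infer_instance

def pvWitness_isPrefixOfWord : String × String := ("i love eating burger", "burg")

def Spec_isPrefixOfWord (sentence : String) (searchWord : String) (out : Int) : Prop := out = isPrefixOfWord_alt sentence searchWord
instance (sentence : String) (searchWord : String) (out : Int) : Decidable (Spec_isPrefixOfWord sentence searchWord out) := by unfold Spec_isPrefixOfWord; infer_instance

-- ===== CLAIM (what is proved, stated in full; the proofs are below) =====
def Claim_equal_isPrefixOfWord : Prop := ∀ (sentence : String) (searchWord : String), Dom_isPrefixOfWord sentence searchWord → Pre_isPrefixOfWord sentence searchWord → Spec_isPrefixOfWord sentence searchWord (isPrefixOfWord sentence searchWord)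

-- ===== LEMMAS AND PROOFS =====

-- proof-side split on a single space, by structural recursion
def splitSp : List Char → List (List Char)
  | [] => [[]]
  | c :: rest =>
    if c = ' ' then [] :: splitSp rest
    else
      match splitSp rest with
      | w :: ws => (c :: w) :: ws
      | [] => [[c]]

theorem splitSp_ne_nil (l : List Char) : splitSp l ≠ [] := by
  cases l with
  | nil => simp [splitSp]
  | cons c rest =>
    simp only [splitSp]
    split_ifs with h
    · simp
    · cases hr : splitSp rest <;> simp

theorem splitOn_go_space (l : List Char) :
    ∀ (fuel : Nat) (cur : List Char) (acc : List (List Char)), l.length ≤ fuel →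
    PySem.Chars.splitOn.go [' '] fuel l cur acc
      = acc.reverse ++ (splitSp l).modifyHead (cur.reverse ++ ·) := by
  induction l with
  | nil =>
    intro fuel cur acc _
    cases fuel <;> simp [PySem.Chars.splitOn.go, splitSp]
  | cons c rest ih =>
    intro fuel cur acc hf
    cases fuel with
    | zero => simp at hf
    | succ f =>
      have hf' : rest.length ≤ f := by simpa using hf
      by_cases h : c = ' '
      · subst h
        rw [show PySem.Chars.splitOn.go [' '] (f+1) (' ' :: rest) cur acc
              = PySem.Chars.splitOn.go [' '] f rest [] (cur.reverse :: acc) by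
            simp [PySem.Chars.splitOn.go]]
        rw [ih f [] (cur.reverse :: acc) hf']
        cases hr : splitSp rest <;> simp [splitSp, hr]
      · rw [show PySem.Chars.splitOn.go [' '] (f+1) (c :: rest) cur acc
              = PySem.Chars.splitOn.go [' '] f rest (c :: cur) acc by
            simp [PySem.Chars.splitOn.go, List.isPrefixOf, Ne.symm h]]
        rw [ih f (c :: cur) acc hf']
        obtain ⟨w, ws, hw⟩ : ∃ w ws, splitSp rest = w :: ws := by
          cases hr : splitSp rest with
          | nil => exact absurd hr (splitSp_ne_nil rest)
          | cons w ws => exact ⟨w, ws, rfl⟩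
        simp [splitSp, h, hw]

theorem splitOn_space (l : List Char) :
    PySem.Chars.splitOn l [' '] = splitSp l := by
  have := splitOn_go_space l (l.length + 1) [] [] (by omega)
  rw [PySem.Chars.splitOn, this]
  cases hr : splitSp l <;> simp

theorem splitSp_head (l : List Char) :
    splitSp l = l.takeWhile (· ≠ ' ')
      :: (if ' ' ∈ l then splitSp ((l.dropWhile (· ≠ ' ')).drop 1) else []) := by
  induction l with
  | nil => simp [splitSp]
  | cons c rest ih =>
    by_cases h : c = ' '
    · subst h
      simp [splitSp, List.takeWhile, List.dropWhile]
    · simp only [splitSp, h, if_false]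
      rw [ih]
      have ht : (c :: rest).takeWhile (· ≠ ' ') = c :: rest.takeWhile (· ≠ ' ') := by
        simp [List.takeWhile, h]
      have hd : (c :: rest).dropWhile (· ≠ ' ') = rest.dropWhile (· ≠ ' ') := by
        simp [List.dropWhile, h]
      simp [h, Ne.symm h]

theorem aMatch_snd_nil_iff (s w : List Char) : (aMatch s w).2 = [] ↔ w <+: s := by
  induction s generalizing w with
  | nil => cases w <;> simp [aMatch]
  | cons c s' ih =>
    cases w with
    | nil => simp [aMatch]
    | cons x w' =>
      by_cases h : c = x
      · subst h; simp [aMatch, ih]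
      · simp [aMatch, h, List.cons_prefix_cons, Ne.symm h]

theorem aMatch_dropWhile (s w : List Char) (hw : ' ' ∉ w) :
    (aMatch s w).1.dropWhile (· ≠ ' ') = s.dropWhile (· ≠ ' ') := by
  induction s generalizing w with
  | nil => cases w <;> simp [aMatch]
  | cons c s' ih =>
    cases w with
    | nil => simp [aMatch]
    | cons x w' =>
      by_cases h : c = x
      · subst h
        have hc : c ≠ ' ' := by rintro rfl; exact hw (by simp)
        have hw' : ' ' ∉ w' := fun hm => hw (List.mem_cons_of_mem _ hm)
        rw [show aMatch (c :: s') (c :: w') = aMatch s' w' by simp [aMatch]]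
        rw [ih w' hw']
        simp [List.dropWhile, hc]
      · simp [aMatch, h]

theorem prefix_takeWhile_of_no_space (s w : List Char) (hw : ' ' ∉ w) (h : w <+: s) :
    w <+: s.takeWhile (· ≠ ' ') := by
  induction w generalizing s with
  | nil => simp
  | cons x w' ih =>
    cases s with
    | nil => simp at h
    | cons c s' =>
      rw [List.cons_prefix_cons] at h
      obtain ⟨rfl, h'⟩ := h
      have hx : x ≠ ' ' := fun hx => hw (by simp [hx])
      have hw' : ' ' ∉ w' := fun hm => hw (List.mem_cons_of_mem _ hm)
      rw [List.takeWhile_cons_of_pos (by simp [hx])]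
      exact List.cons_prefix_cons.mpr ⟨rfl, ih s' hw' h'⟩

theorem main_loop (w : List Char) (hw : ' ' ∉ w) (s : List Char)
    (hne : s ≠ [] ∨ w ≠ []) (ans : Int) :
    aLoop w s ans = bLoop w (splitSp s) ans := by
  by_cases hs : s = []
  · subst hs
    have hwne : w ≠ [] := hne.resolve_left (by simp)
    have hsw : PySem.Chars.startswith ([] : List Char) w = false := by
      rw [Bool.eq_false_iff]
      intro h
      exact hwne (List.prefix_nil.mp ((PySem.Chars.startswith_iff _ _).mp h))
    rw [aLoop]
    simp [splitSp, bLoop, hsw]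
  · rw [aLoop]
    rw [splitSp_head]
    by_cases hm : (aMatch s w).2 = []
    · have hpre : w <+: s := (aMatch_snd_nil_iff s w).mp hm
      have : PySem.Chars.startswith (s.takeWhile (· ≠ ' ')) w = true :=
        (PySem.Chars.startswith_iff _ _).mpr (prefix_takeWhile_of_no_space s w hw hpre)
      simp only [decide_not] at this
      simp [hs, hm, bLoop, this]
    · have hnpre : ¬ w <+: s := fun h => hm ((aMatch_snd_nil_iff s w).mpr h)
      have hwne : w ≠ [] := by
        intro h
        exact hnpre (h ▸ List.nil_prefix)
      have hsw : PySem.Chars.startswith (s.takeWhile (· ≠ ' ')) w = false := by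
        rw [Bool.eq_false_iff]
        intro h
        exact hnpre (((PySem.Chars.startswith_iff _ _).mp h).trans (List.takeWhile_prefix _))
      have hskip : aSkip (aMatch s w).1 = (s.dropWhile (· ≠ ' ')).drop 1 := by
        unfold aSkip
        rw [aMatch_dropWhile s w hw]
      by_cases hsp : ' ' ∈ s
      · have hrec : aLoop w ((s.dropWhile (· ≠ ' ')).drop 1) (ans + 1)
            = bLoop w (splitSp ((s.dropWhile (· ≠ ' ')).drop 1)) (ans + 1) :=
          main_loop w hw ((s.dropWhile (· ≠ ' ')).drop 1) (Or.inr hwne) (ans + 1)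
        simp only [decide_not, List.drop_one] at hsw hskip hrec
        simp [hs, hm, bLoop, hsw, hsp, hskip, hrec]
      · have hdw : s.dropWhile (· ≠ ' ') = [] := by
          rw [List.dropWhile_eq_nil_iff]
          intro x hx
          simp only [decide_eq_true_eq]
          intro hx'
          exact hsp (hx' ▸ hx)
        have : aLoop w ([] : List Char) (ans + 1) = -1 := by rw [aLoop]; simp
        simp only [decide_not, List.drop_one] at hsw hskip hdw
        simp [hs, hm, bLoop, hsw, hsp, hskip, hdw, this]
termination_by s.length
decreasing_by
  have h1 := List.length_dropWhile_le (fun c => decide (c ≠ ' ')) s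
  have h2 : ((s.dropWhile (· ≠ ' ')).drop 1).length = (s.dropWhile (· ≠ ' ')).length - 1 := by
    simp
  have h4 : 0 < (s.dropWhile (· ≠ ' ')).length := by
    rw [List.length_pos_iff]
    intro hnil
    rw [List.dropWhile_eq_nil_iff] at hnil
    have := hnil ' ' hsp
    simp at this
  omega

theorem aMatch_fst_suffix (s w : List Char) : (aMatch s w).1 <:+ s := by
  induction s generalizing w with
  | nil => cases w <;> simp [aMatch]
  | cons c s' ih =>
    cases w with
    | nil => simp [aMatch]
    | cons x w' =>
      by_cases h : c = x
      · subst h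
        rw [show aMatch (c :: s') (c :: w') = aMatch s' w' by simp [aMatch]]
        exact (ih w').trans (List.suffix_cons c s')
      · simp [aMatch, h]

theorem aSkip_suffix (t : List Char) : aSkip t <:+ t :=
  (List.drop_suffix _ _).trans (List.dropWhile_suffix _)

theorem splitSp_no_space (s : List Char) : ∀ word ∈ splitSp s, ' ' ∉ word := by
  induction s with
  | nil => simp [splitSp]
  | cons c rest ih =>
    by_cases h : c = ' '
    · subst h
      simp only [splitSp]
      intro word hword
      rcases List.mem_cons.mp hword with rfl | hmem
      · simp
      · exact ih word hmem
    · simp only [splitSp, h, if_false]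
      obtain ⟨v, vs, hv⟩ : ∃ v vs, splitSp rest = v :: vs := by
        cases hr : splitSp rest with
        | nil => exact absurd hr (splitSp_ne_nil rest)
        | cons v vs => exact ⟨v, vs, rfl⟩
      rw [hv]
      intro word hword
      rcases List.mem_cons.mp hword with rfl | hmem
      · intro hsp
        rcases List.mem_cons.mp hsp with hc | hmem'
        · exact h hc.symm
        · exact ih v (hv ▸ List.mem_cons_self ..) hmem'
      · exact ih word (hv ▸ List.mem_cons_of_mem v hmem)

theorem bLoop_space (w : List Char) (hw : ' ' ∈ w) (ws : List (List Char))
    (hws : ∀ word ∈ ws, ' ' ∉ word) : ∀ i : Int, bLoop w ws i = -1 := by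
  induction ws with
  | nil => intro i; simp [bLoop]
  | cons word rest ih =>
    intro i
    have hsw : PySem.Chars.startswith word w = false := by
      rw [Bool.eq_false_iff]
      intro h
      exact hws word (List.mem_cons_self ..) (((PySem.Chars.startswith_iff _ _).mp h).mem hw)
    simp only [bLoop, hsw, Bool.false_eq_true, if_false]
    exact ih (fun word hm => hws word (List.mem_cons_of_mem _ hm)) (i + 1)

theorem aLoop_no_infix (w : List Char) (t : List Char) (hni : ¬ w <:+: t) (ans : Int) :
    aLoop w t ans = -1 := by
  by_cases ht : t = []
  · subst ht; rw [aLoop]; simp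
  · have hm : (aMatch t w).2 ≠ [] := by
      intro h
      exact hni ((aMatch_snd_nil_iff t w).mp h).isInfix
    have hni' : ¬ w <:+: aSkip (aMatch t w).1 := fun h =>
      hni (h.trans ((aSkip_suffix _).trans (aMatch_fst_suffix t w)).isInfix)
    rw [aLoop]
    simp only [dif_neg ht, if_neg hm]
    exact aLoop_no_infix w (aSkip (aMatch t w).1) hni' (ans + 1)
termination_by t.length
decreasing_by
  have h1 := aMatch_fst_length t w
  have h2 := aSkip_length (aMatch t w).1
  have : 0 < t.length := List.length_pos_iff.mpr ht
  omega

-- ===== VERDICT (by name: the statement is the Claim_ definition above) =====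
theorem isPrefixOfWord_spec : Claim_equal_isPrefixOfWord := by
  intro sentence searchWord _ hpre
  unfold Spec_isPrefixOfWord isPrefixOfWord isPrefixOfWord_alt
  obtain ⟨hw, hne⟩ := hpre
  rw [show (" ".toList : List Char) = [' '] from rfl, splitOn_space]
  by_cases hsp : ' ' ∈ searchWord.toList
  · rw [aLoop_no_infix searchWord.toList sentence.toList (hw hsp) 1,
        bLoop_space searchWord.toList hsp (splitSp sentence.toList)
          (splitSp_no_space sentence.toList) 1]
  · have hne' : sentence.toList ≠ [] ∨ searchWord.toList ≠ [] := by
      by_contra hcon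
      simp only [not_or, ne_eq, not_not] at hcon
      refine hne ⟨?_, ?_⟩ <;> simp_all
    exact main_loop searchWord.toList hsp sentence.toList hne' 1
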